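-- pv_equiv track=rewrite | github.com/jy00nse0/Fastext | generate_testset_vector.py | compute_subwords
-- ===== SOURCE A (Python) =====
-- from typing import List, Dict, Tuple, Optional
--
-- def fastext_hash(word: bytes) -> int:
--     """
--     FNV-1a hash function (same as FastTextHash in C++ code).
--     Uses signed int8 for XOR operation to match C++ behavior.
--     """
--     h = 2166136261
--     for byte in word:
--         # Simulate signed int8 behavior for XOR
--         signed_byte = byte if byte < 128 else byte - 256
--         h = h ^ (signed_byte & 0xFFFFFFFF)
--         h = (h * 16777619) & 0xFFFFFFFF
--     return h
--
-- def get_word_hash(word: bytes, bucket_size: int) -> int: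
--     """Get subword bucket index (same as GetWordHash in C++ code)."""
--     return fastext_hash(word) % bucket_size
--
-- def compute_subwords(word: str, maxn: int, bucket_size: int, vocab_size: int) -> List[int]:
--     """
--     Compute subword indices for a word (same as computeSubwords in C++ code).
--
--     The word should already have < and > markers around it.
--     Returns list of subword bucket indices (offset by vocab_size).
--     """
--     subwords = []
--     word_bytes = word.encode('utf-8')
--     buflen = len(word_bytes)
--
--     if buflen == 0:
--         return subwords
--
--     i = 0
--     while i < buflen:
--         # Skip UTF-8 continuation bytes
--         if (word_bytes[i] & 0xC0) == 0x80:
--             i += 1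
--             continue
--
--         for n in range(1, maxn + 1):
--             ngram_bytes = bytearray()
--             ngram_len = 0
--             jj = i
--
--             while jj < buflen and ngram_len < n:
--                 ngram_bytes.append(word_bytes[jj])
--                 jj += 1
--                 ngram_len += 1
--                 # Include UTF-8 continuation bytes
--                 while jj < buflen and (word_bytes[jj] & 0xC0) == 0x80:
--                     ngram_bytes.append(word_bytes[jj])
--                     jj += 1
--
--             # Only add if not at word boundary (same condition as C++ code)
--             # (n >= 1 && n <= 6) && !(i == 0 || jj == buflen)
--             if 1 <= n <= 6 and not (i == 0 or jj == buflen):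
--                 h = get_word_hash(bytes(ngram_bytes), bucket_size)
--                 idx = vocab_size + h
--                 subwords.append(idx)
--
--         i += 1
--
--     return subwords
-- ===== SOURCE B (Python) =====
-- def _fnv_step(h: int, byte: int) -> int:
--     """One FNV-1a step on a byte (signed-int8 XOR as in the C++ code)."""
--     sb = byte if byte < 128 else byte - 256
--     return ((h ^ (sb & 0xFFFFFFFF)) * 16777619) & 0xFFFFFFFF
--
-- def compute_subwords(word, maxn, bucket_size, vocab_size):
--     """Same result as A, but each start position rolls one FNV-1a hash
--     forward instead of re-hashing every n-gram from scratch, and n is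
--     capped at min(maxn, 6) (longer n-grams are never emitted)."""
--     subwords = []
--     wb = word.encode('utf-8')
--     buflen = len(wb)
--     nmax = 6 if maxn > 6 else maxn
--     i = 1  # i == 0 never emits (word-boundary rule), so start at 1
--     while i < buflen:
--         if (wb[i] & 0xC0) == 0x80:  # skip UTF-8 continuation bytes
--             i += 1
--             continue
--         h = 2166136261
--         jj = i
--         n = 0
--         while n < nmax and jj < buflen:
--             h = _fnv_step(h, wb[jj])
--             jj += 1
--             while jj < buflen and (wb[jj] & 0xC0) == 0x80:
--                 h = _fnv_step(h, wb[jj])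
--                 jj += 1
--             n += 1
--             if jj < buflen:
--                 subwords.append(vocab_size + h % bucket_size)
--         i += 1
--     return subwords
-- ===== Notes on version B (the rewrite author's own statement) =====
-- stated objective: faster
-- what changed: Instead of rebuilding and re-hashing every n-gram from scratch for each n in range(1, maxn+1), B keeps one rolling FNV-1a hash per start position, extends it by one character group at a time, and caps n at min(maxn, 6) since longer n-grams are never emitted.
-- outside the precondition, e.g. on compute_subwords('ab', 3, 0, 10): A returns [], B returns []
import Mathlib
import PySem

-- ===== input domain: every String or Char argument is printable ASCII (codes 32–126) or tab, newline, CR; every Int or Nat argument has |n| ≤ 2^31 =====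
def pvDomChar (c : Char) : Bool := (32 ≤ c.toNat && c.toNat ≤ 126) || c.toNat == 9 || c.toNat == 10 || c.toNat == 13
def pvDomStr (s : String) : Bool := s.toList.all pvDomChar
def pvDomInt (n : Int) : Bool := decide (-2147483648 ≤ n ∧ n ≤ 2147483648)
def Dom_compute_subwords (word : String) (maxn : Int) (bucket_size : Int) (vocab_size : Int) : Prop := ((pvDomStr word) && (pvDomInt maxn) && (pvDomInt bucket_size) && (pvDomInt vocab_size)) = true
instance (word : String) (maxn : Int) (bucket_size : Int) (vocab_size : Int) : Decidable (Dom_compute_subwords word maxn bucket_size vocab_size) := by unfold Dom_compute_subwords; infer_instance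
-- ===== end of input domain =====

-- B rolls one FNV-1a hash forward per start position (and caps n at 6) instead of
-- re-hashing every n-gram from scratch; same return value, fewer byte operations.
-- Loops are ported as structural recursion on a fuel argument (wb.length, always
-- sufficient since the loop index strictly increases towards wb.length).

-- ===== PORT A =====
-- word.encode('utf-8') as a byte list; exact on Dom's ASCII strings (codes ≤ 126 = their UTF-8 byte)
def pvBytes (word : String) : List Nat := word.toList.map Char.toNat

-- (byte & 0xC0) == 0x80 : UTF-8 continuation byte test
def pvCont (b : Nat) : Bool := b &&& 0xC0 == 0x80

-- one FNV-1a step: the two assignments of fastext_hash's loop body;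
-- `if b < 128 then b else b + 4294967040` is Python's `(b-256) & 0xFFFFFFFF` for b ≥ 128
def pvFnvStep (h b : Nat) : Nat :=
  ((h ^^^ (if b < 128 then b else b + 4294967040)) * 16777619) % 4294967296

-- fastext_hash
def pvFnv (bs : List Nat) : Nat := bs.foldl pvFnvStep 2166136261

-- inner `while jj < buflen and (word_bytes[jj] & 0xC0) == 0x80` of A, appending to the buffer
def pvTakeCont (wb : List Nat) : Nat → Nat → List Nat → List Nat × Nat
  | 0, jj, acc => (acc, jj)
  | f + 1, jj, acc =>
    if h : jj < wb.length then
      if pvCont wb[jj] then pvTakeCont wb f (jj + 1) (acc ++ [wb[jj]]) else (acc, jj)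
    else (acc, jj)

-- `while jj < buflen and ngram_len < n` of A, building the n-gram buffer
def pvBuild (wb : List Nat) : Nat → Nat → Nat → Int → List Nat → List Nat × Nat
  | 0, jj, _, _, acc => (acc, jj)
  | f + 1, jj, len, n, acc =>
    if h : jj < wb.length ∧ (len : Int) < n then
      let r := pvTakeCont wb wb.length (jj + 1) (acc ++ [wb[jj]'(h.1)])
      pvBuild wb f r.2 (len + 1) n r.1
    else (acc, jj)

-- A's outer `while i < buflen` loop; the per-i `for n in range(1, maxn + 1)` is the foldl
def pvLoopA (wb : List Nat) (maxn bs vs : Int) : Nat → Nat → List Int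
  | 0, _ => []
  | f + 1, i =>
    if hi : i < wb.length then
      if pvCont wb[i] then pvLoopA wb maxn bs vs f (i + 1)
      else
        ((PySem.List.pyRange 1 (maxn + 1) 1).foldl (fun acc n =>
            let r := pvBuild wb wb.length i 0 n []
            if 1 ≤ n ∧ n ≤ 6 ∧ ¬(i = 0 ∨ r.2 = wb.length) then
              acc ++ [vs + PySem.Int.mod (pvFnv r.1) bs]
            else acc) [])
          ++ pvLoopA wb maxn bs vs f (i + 1)
    else []

def compute_subwords (word : String) (maxn : Int) (bucket_size : Int) (vocab_size : Int) : List Int :=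
  pvLoopA (pvBytes word) maxn bucket_size vocab_size (pvBytes word).length 0

-- ===== PORT B =====
-- inner continuation-byte while of B, rolling the hash instead of buffering bytes
def pvRollCont (wb : List Nat) : Nat → Nat → Nat → Nat × Nat
  | 0, jj, h => (h, jj)
  | f + 1, jj, h =>
    if hj : jj < wb.length then
      if pvCont wb[jj] then pvRollCont wb f (jj + 1) (pvFnvStep h wb[jj]) else (h, jj)
    else (h, jj)

-- B's `while n < nmax and jj < buflen` loop: extend by one char group, emit if not at the boundary
def pvExtendB (wb : List Nat) (bs vs nmax : Int) : Nat → Nat → Nat → Nat → List Int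
  | 0, _, _, _ => []
  | f + 1, jj, h, n =>
    if hc : (n : Int) < nmax ∧ jj < wb.length then
      let r := pvRollCont wb wb.length (jj + 1) (pvFnvStep h (wb[jj]'(hc.2)))
      if r.2 < wb.length then
        (vs + PySem.Int.mod r.1 bs) :: pvExtendB wb bs vs nmax f r.2 r.1 (n + 1)
      else []
    else []

-- B's outer `while i < buflen` loop, started at i = 1
def pvLoopB (wb : List Nat) (nmax bs vs : Int) : Nat → Nat → List Int
  | 0, _ => []
  | f + 1, i =>
    if hi : i < wb.length then
      if pvCont wb[i] then pvLoopB wb nmax bs vs f (i + 1)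
      else pvExtendB wb bs vs nmax wb.length i 2166136261 0 ++ pvLoopB wb nmax bs vs f (i + 1)
    else []

def compute_subwords_alt (word : String) (maxn : Int) (bucket_size : Int) (vocab_size : Int) : List Int :=
  pvLoopB (pvBytes word) (if 6 < maxn then 6 else maxn) bucket_size vocab_size (pvBytes word).length 1

-- ===== PRECONDITION & SPEC =====
-- Pre_ excludes bucket_size = 0, where A raises ZeroDivisionError whenever any n-gram is
-- hashed; on words too short to yield an n-gram A still returns [] there, and B does too.
def Pre_compute_subwords (word : String) (maxn : Int) (bucket_size : Int) (vocab_size : Int) : Prop :=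
  bucket_size ≠ 0
instance (word : String) (maxn : Int) (bucket_size : Int) (vocab_size : Int) : Decidable (Pre_compute_subwords word maxn bucket_size vocab_size) := by unfold Pre_compute_subwords; infer_instance

def pvWitness_compute_subwords : String × Int × Int × Int := ("<hello>", 5, 2000000, 10)

def Spec_compute_subwords (word : String) (maxn : Int) (bucket_size : Int) (vocab_size : Int) (out : List Int) : Prop := out = compute_subwords_alt word maxn bucket_size vocab_size
instance (word : String) (maxn : Int) (bucket_size : Int) (vocab_size : Int) (out : List Int) : Decidable (Spec_compute_subwords word maxn bucket_size vocab_size out) := by unfold Spec_compute_subwords; infer_instance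

-- ===== CLAIM (what is proved, stated in full; the proofs are below) =====
def Claim_equal_compute_subwords : Prop := ∀ (word : String) (maxn : Int) (bucket_size : Int) (vocab_size : Int), Dom_compute_subwords word maxn bucket_size vocab_size → Pre_compute_subwords word maxn bucket_size vocab_size → Spec_compute_subwords word maxn bucket_size vocab_size (compute_subwords word maxn bucket_size vocab_size)

-- ===== LEMMAS AND PROOFS =====

-- one extension step: consume the byte at position .2 plus its continuation bytes
def pvStep (wb : List Nat) (p : List Nat × Nat) : List Nat × Nat :=
  if h : p.2 < wb.length then pvTakeCont wb wb.length (p.2 + 1) (p.1 ++ [wb[p.2]]) else p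

-- reference emission list: fuel more extensions from state s, emitting while not at the end
def pvRef (wb : List Nat) (bs vs : Int) : Nat → List Nat × Nat → List Int
  | 0, _ => []
  | f + 1, s =>
    if s.2 < wb.length then
      let s' := pvStep wb s
      (if s'.2 < wb.length then [vs + PySem.Int.mod (pvFnv s'.1) bs] else []) ++ pvRef wb bs vs f s'
    else []

theorem pvRef_stop (wb : List Nat) (bs vs : Int) (f : Nat) (s : List Nat × Nat)
    (h : ¬ s.2 < wb.length) : pvRef wb bs vs f s = [] := by
  cases f <;> simp [pvRef, h]

theorem pvTakeCont_ge (wb : List Nat) : ∀ f jj acc, jj ≤ (pvTakeCont wb f jj acc).2 := by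
  intro f
  induction f with
  | zero => intro jj acc; simp [pvTakeCont]
  | succ f ih =>
      intro jj acc
      rw [pvTakeCont]
      split
      · split
        · exact le_trans (Nat.le_succ jj) (ih _ _)
        · simp
      · simp

theorem pvTakeCont_le (wb : List Nat) : ∀ f jj acc, jj ≤ wb.length → (pvTakeCont wb f jj acc).2 ≤ wb.length := by
  intro f
  induction f with
  | zero => intro jj acc h; simpa [pvTakeCont] using h
  | succ f ih =>
      intro jj acc h
      rw [pvTakeCont]
      split
      · rename_i hj
        split
        · exact ih _ _ hj
        · simpa using h
      · simpa using h

theorem pvStep_le (wb : List Nat) (s : List Nat × Nat) (h : s.2 ≤ wb.length) :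
    (pvStep wb s).2 ≤ wb.length := by
  unfold pvStep
  split
  · exact pvTakeCont_le wb _ _ _ (by omega)
  · exact h

theorem pvStep_iter_le (wb : List Nat) (s : List Nat × Nat) (h : s.2 ≤ wb.length) (m : Nat) :
    ((pvStep wb)^[m] s).2 ≤ wb.length := by
  induction m generalizing s with
  | zero => simpa using h
  | succ m ih => rw [Function.iterate_succ_apply]; exact ih _ (pvStep_le wb s h)

-- rolling the hash tracks buffering the bytes, byte for byte
theorem pvRollCont_eq_takeCont (wb : List Nat) : ∀ f jj acc,
    pvRollCont wb f jj (pvFnv acc) = ((pvFnv (pvTakeCont wb f jj acc).1), (pvTakeCont wb f jj acc).2) := by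
  intro f
  induction f with
  | zero => intro jj acc; simp [pvRollCont, pvTakeCont]
  | succ f ih =>
      intro jj acc
      rw [pvRollCont, pvTakeCont]
      split
      · rename_i hj
        split
        · have hf : pvFnvStep (pvFnv acc) wb[jj] = pvFnv (acc ++ [wb[jj]]) := by
            rw [pvFnv, pvFnv, List.foldl_append, List.foldl_cons, List.foldl_nil]
          rw [hf]; exact ih _ _
        · simp
      · simp

-- with the while-condition false, pvBuild returns its state at once (any fuel)
theorem pvBuild_noop (wb : List Nat) (f jj len : Nat) (n : Int) (acc : List Nat)
    (h : ¬ ((len : Int) < n)) : pvBuild wb f jj len n acc = (acc, jj) := by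
  cases f with
  | zero => rfl
  | succ f => rw [pvBuild, dif_neg (by tauto)]

-- building the (len+k+1)-gram = one pvStep after building the (len+k)-gram
theorem pvBuild_succ (wb : List Nat) : ∀ (f k jj len : Nat) (acc : List Nat), wb.length - jj ≤ f →
    pvBuild wb f jj len ((len : Int) + k + 1) acc = pvStep wb (pvBuild wb f jj len ((len : Int) + k) acc) := by
  intro f
  induction f with
  | zero =>
      intro k jj len acc hf
      rw [pvBuild, pvBuild, pvStep]
      simp only []
      rw [dif_neg (by omega)]
  | succ f ih =>
      intro k jj len acc hf
      by_cases hj : jj < wb.length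
      · cases k with
        | zero =>
            simp only [Nat.cast_zero, add_zero]
            rw [pvBuild, dif_pos ⟨hj, by omega⟩]
            rw [pvBuild_noop wb f _ (len + 1) ((len : Int) + 1) _ (by push_cast; omega)]
            rw [pvBuild_noop wb (f + 1) jj len (len : Int) acc (by omega)]
            rw [pvStep, dif_pos hj]
        | succ k =>
            rw [pvBuild, dif_pos (show jj < wb.length ∧ (len : Int) < (len : Int) + (k + 1 : Nat) + 1 by
                  refine ⟨hj, by push_cast; omega⟩)]
            conv_rhs => rw [pvBuild]
            rw [dif_pos (show jj < wb.length ∧ (len : Int) < (len : Int) + (k + 1 : Nat) by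
                  refine ⟨hj, by push_cast; omega⟩)]
            have hge : jj + 1 ≤ (pvTakeCont wb wb.length (jj + 1) (acc ++ [wb[jj]'hj])).2 :=
              pvTakeCont_ge wb _ _ _
            have := ih k (pvTakeCont wb wb.length (jj + 1) (acc ++ [wb[jj]'hj])).2 (len + 1)
                       (pvTakeCont wb wb.length (jj + 1) (acc ++ [wb[jj]'hj])).1 (by omega)
            simp only []
            convert this using 3 <;> push_cast <;> ring
      · rw [pvBuild, dif_neg (by tauto), pvBuild, dif_neg (by tauto)]
        rw [pvStep, dif_neg (by simpa using hj)]

theorem pvBuild_iter (wb : List Nat) (i : Nat) : ∀ (m : Nat),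
    pvBuild wb wb.length i 0 (m : Int) [] = (pvStep wb)^[m] ([], i) := by
  intro m
  induction m with
  | zero => rw [pvBuild_noop wb _ _ _ _ _ (by omega)]; rfl
  | succ m ih =>
      have h := pvBuild_succ wb wb.length m i 0 [] (by omega)
      simp only [Nat.cast_zero, zero_add] at h
      rw [show ((m : Int) + 1) = ((m + 1 : Nat) : Int) by push_cast; ring] at h
      rw [h, ih, Function.iterate_succ_apply']

-- the A-side fold over n = n0+1 … n0+m equals the reference run from state (pvStep)^[n0]([], i)
theorem pvFold_ref (wb : List Nat) (bs vs : Int) (i : Nat) (hi : i ≠ 0) (hil : i ≤ wb.length) :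
    ∀ (m n0 : Nat) (acc : List Int), n0 + m ≤ 6 →
    (PySem.List.pyRange ((n0 : Int) + 1) ((n0 : Int) + m + 1) 1).foldl (fun acc n =>
        let r := pvBuild wb wb.length i 0 n []
        if 1 ≤ n ∧ n ≤ 6 ∧ ¬(i = 0 ∨ r.2 = wb.length) then
          acc ++ [vs + PySem.Int.mod (pvFnv r.1) bs]
        else acc) acc
      = acc ++ pvRef wb bs vs m ((pvStep wb)^[n0] ([], i)) := by
  intro m
  induction m with
  | zero =>
      intro n0 acc _
      simp only [Nat.cast_zero, add_zero]
      simp [PySem.List.pyRange_one, pvRef]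
  | succ m ih =>
      intro n0 acc hm
      rw [PySem.List.pyRange_one_cons (by omega)]
      rw [List.foldl_cons]
      have hstate : ((pvStep wb)^[n0] ([], i) : List Nat × Nat).2 ≤ wb.length :=
        pvStep_iter_le wb _ (by simpa using hil) n0
      set s := ((pvStep wb)^[n0] ([], i) : List Nat × Nat) with hs
      have hbuild : pvBuild wb wb.length i 0 ((n0 : Int) + 1) [] = pvStep wb s := by
        rw [show ((n0 : Int) + 1) = ((n0 + 1 : Nat) : Int) by push_cast; ring]
        rw [pvBuild_iter, Function.iterate_succ_apply', hs]
      by_cases hsl : s.2 < wb.length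
      · -- an extension really happens; emission iff the new end is below the length
        have hstep_le : (pvStep wb s).2 ≤ wb.length := pvStep_le wb s hstate
        have hguard : (1 ≤ (n0 : Int) + 1 ∧ (n0 : Int) + 1 ≤ 6 ∧ ¬(i = 0 ∨ (pvStep wb s).2 = wb.length))
            ↔ ((pvStep wb s).2 < wb.length) := by
          constructor
          · rintro ⟨-, -, hne⟩; omega
          · intro hlt; refine ⟨by omega, by push_cast; omega, by omega⟩
        simp only [hbuild]
        by_cases hemit : (pvStep wb s).2 < wb.length
        · rw [if_pos (hguard.mpr hemit)]
          rw [show ((n0 : Int) + (m + 1 : Nat) + 1) = (((n0 + 1 : Nat)) : Int) + m + 1 by push_cast; ring]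
          rw [show ((n0 : Int) + 1) = (((n0 + 1 : Nat)) : Int) by push_cast; ring]
          rw [ih (n0 + 1) _ (by omega)]
          rw [Function.iterate_succ_apply', ← hs]
          conv_rhs => rw [pvRef]
          simp only [if_pos hsl, if_pos hemit]
          simp
        · rw [if_neg (fun hg => hemit (hguard.mp hg))]
          rw [show ((n0 : Int) + (m + 1 : Nat) + 1) = (((n0 + 1 : Nat)) : Int) + m + 1 by push_cast; ring]
          rw [show ((n0 : Int) + 1) = (((n0 + 1 : Nat)) : Int) by push_cast; ring]
          rw [ih (n0 + 1) _ (by omega)]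
          rw [Function.iterate_succ_apply', ← hs]
          conv_rhs => rw [pvRef]
          simp only [if_pos hsl, if_neg hemit]
          rw [pvRef_stop wb bs vs m _ hemit]
          simp
      · -- the buffer is exhausted: nothing is emitted any more on either side
        have hfix : pvStep wb s = s := by rw [pvStep, dif_neg hsl]
        have hguard2 : ¬ (1 ≤ (n0 : Int) + 1 ∧ (n0 : Int) + 1 ≤ 6 ∧ ¬(i = 0 ∨ (pvStep wb s).2 = wb.length)) := by
          rw [hfix]; rintro ⟨-, -, hne⟩; omega
        simp only [hbuild]
        rw [if_neg hguard2]
        rw [show ((n0 : Int) + (m + 1 : Nat) + 1) = (((n0 + 1 : Nat)) : Int) + m + 1 by push_cast; ring]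
        rw [show ((n0 : Int) + 1) = (((n0 + 1 : Nat)) : Int) by push_cast; ring]
        rw [ih (n0 + 1) _ (by omega)]
        rw [Function.iterate_succ_apply', ← hs, hfix]
        rw [pvRef_stop wb bs vs (m + 1) s hsl, pvRef_stop wb bs vs m s hsl]

-- B's extension loop equals the reference run (hash = pvFnv of the buffered bytes)
theorem pvExtendB_ref (wb : List Nat) (bs vs nmax : Int) :
    ∀ (f jj : Nat) (acc : List Nat) (n : Nat), wb.length - jj ≤ f →
    pvExtendB wb bs vs nmax f jj (pvFnv acc) n = pvRef wb bs vs (nmax - n).toNat (acc, jj) := by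
  intro f
  induction f with
  | zero =>
      intro jj acc n hf
      rw [pvExtendB, pvRef_stop wb bs vs _ _ (by simp; omega)]
  | succ f ih =>
      intro jj acc n hf
      rw [pvExtendB]
      by_cases hc : (n : Int) < nmax ∧ jj < wb.length
      · rw [dif_pos hc]
        have hT := pvRollCont_eq_takeCont wb wb.length (jj + 1) (acc ++ [wb[jj]'(hc.2)])
        have hfold : pvFnvStep (pvFnv acc) (wb[jj]'(hc.2)) = pvFnv (acc ++ [wb[jj]'(hc.2)]) := by
          rw [pvFnv, pvFnv, List.foldl_append, List.foldl_cons, List.foldl_nil]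
        obtain ⟨g, hg⟩ : ∃ g, (nmax - n).toNat = g + 1 := ⟨(nmax - n).toNat - 1, by omega⟩
        have hgn : (nmax - (n + 1 : Nat)).toNat = g := by push_cast; omega
        rw [hg]
        conv_rhs => rw [pvRef]
        rw [if_pos hc.2]
        have hstep : pvStep wb (acc, jj) = pvTakeCont wb wb.length (jj + 1) (acc ++ [wb[jj]'(hc.2)]) := by
          rw [pvStep, dif_pos hc.2]
        simp only [hfold, hT, hstep]
        set t := pvTakeCont wb wb.length (jj + 1) (acc ++ [wb[jj]'(hc.2)]) with ht
        by_cases hlt : t.2 < wb.length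
        · rw [if_pos hlt, if_pos hlt]
          have hge : jj + 1 ≤ t.2 := by rw [ht]; exact pvTakeCont_ge wb _ _ _
          rw [ih t.2 t.1 (n + 1) (by omega), hgn]
          simp
        · rw [if_neg hlt, if_neg hlt]
          rw [pvRef_stop wb bs vs g _ hlt]
          simp
      · rw [dif_neg hc]
        rcases Decidable.not_and_iff_or_not.mp hc with hn | hj
        · have h0 : (nmax - n).toNat = 0 := by omega
          rw [h0, pvRef]
        · rw [pvRef_stop wb bs vs _ _ (by simpa using hj)]

-- per start position i ≥ 1: A's n-loop = B's extension loop
theorem pvPos_eq (wb : List Nat) (maxn bs vs : Int) (i : Nat) (hi : i ≠ 0) (hil : i ≤ wb.length) :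
    (PySem.List.pyRange 1 (maxn + 1) 1).foldl (fun acc n =>
        let r := pvBuild wb wb.length i 0 n []
        if 1 ≤ n ∧ n ≤ 6 ∧ ¬(i = 0 ∨ r.2 = wb.length) then
          acc ++ [vs + PySem.Int.mod (pvFnv r.1) bs]
        else acc) []
      = pvExtendB wb bs vs (if 6 < maxn then 6 else maxn) wb.length i 2166136261 0 := by
  set m' : Int := if 6 < maxn then 6 else maxn with hm'
  have hm'le : m' ≤ 6 := by rw [hm']; split <;> omega
  clear_value m'
  have hfnv : (2166136261 : Nat) = pvFnv [] := rfl
  rw [hfnv, pvExtendB_ref wb bs vs m' wb.length i [] 0 (by omega)]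
  have htrunc : (PySem.List.pyRange 1 (maxn + 1) 1).foldl (fun acc n =>
        let r := pvBuild wb wb.length i 0 n []
        if 1 ≤ n ∧ n ≤ 6 ∧ ¬(i = 0 ∨ r.2 = wb.length) then
          acc ++ [vs + PySem.Int.mod (pvFnv r.1) bs]
        else acc) []
      = (PySem.List.pyRange 1 (m' + 1) 1).foldl (fun acc n =>
        let r := pvBuild wb wb.length i 0 n []
        if 1 ≤ n ∧ n ≤ 6 ∧ ¬(i = 0 ∨ r.2 = wb.length) then
          acc ++ [vs + PySem.Int.mod (pvFnv r.1) bs]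
        else acc) [] := by
    by_cases h6 : 6 < maxn
    · rw [hm']; rw [if_pos h6]
      rw [show (6 : Int) + 1 = 7 by norm_num]
      rw [PySem.List.pyRange_one_append 1 7 (maxn + 1) (by omega) (by omega)]
      rw [List.foldl_append]
      have : ∀ l : List Int, (∀ x ∈ l, (7 : Int) ≤ x) → ∀ acc : List Int,
          l.foldl (fun acc n =>
            let r := pvBuild wb wb.length i 0 n []
            if 1 ≤ n ∧ n ≤ 6 ∧ ¬(i = 0 ∨ r.2 = wb.length) then
              acc ++ [vs + PySem.Int.mod (pvFnv r.1) bs]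
            else acc) acc = acc := by
        intro l hl
        induction l with
        | nil => intro acc; rfl
        | cons x xs ihx =>
            intro acc
            rw [List.foldl_cons]
            have h7 : (7 : Int) ≤ x := hl x (List.mem_cons_self)
            rw [if_neg (by rintro ⟨-, hle, -⟩; omega)]
            exact ihx (fun y hy => hl y (List.mem_cons_of_mem _ hy)) acc
      exact this _ (fun x hx => (PySem.List.mem_pyRange_one.mp hx).1) _
    · rw [hm', if_neg h6]
  rw [htrunc]
  by_cases hpos : 1 ≤ m'
  · obtain ⟨mN, hmN⟩ : ∃ mN : Nat, m' = (mN : Int) := ⟨m'.toNat, by omega⟩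
    have hA := pvFold_ref wb bs vs i hi hil mN 0 [] (by omega)
    rw [show (((0 : Nat) : Int) + 1) = 1 by norm_num,
        show (((0 : Nat) : Int) + (mN : Int) + 1) = m' + 1 by omega] at hA
    rw [hA]
    rw [show (m' - ((0 : Nat) : Int)).toNat = mN by omega]
    simp
  · have hempty : PySem.List.pyRange 1 (m' + 1) 1 = [] := by
      simp [PySem.List.pyRange_one]
      omega
    rw [hempty]
    rw [show (m' - ((0 : Nat) : Int)).toNat = 0 by omega]
    rfl

-- the two outer loops agree from any i ≥ 1 (any sufficient fuels)
theorem pvLoops_eq (wb : List Nat) (maxn bs vs : Int) :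
    ∀ (fa fb i : Nat), wb.length - i ≤ fa → wb.length - i ≤ fb → 1 ≤ i →
    pvLoopA wb maxn bs vs fa i = pvLoopB wb (if 6 < maxn then 6 else maxn) bs vs fb i := by
  intro fa
  induction fa with
  | zero =>
      intro fb i hfa hfb hi1
      have hi : ¬ i < wb.length := by omega
      cases fb with
      | zero => rfl
      | succ fb => rw [pvLoopA, pvLoopB, dif_neg hi]
  | succ fa ih =>
      intro fb i hfa hfb hi1
      by_cases hi : i < wb.length
      · obtain ⟨fb', rfl⟩ : ∃ fb', fb = fb' + 1 := ⟨fb - 1, by omega⟩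
        rw [pvLoopA, pvLoopB, dif_pos hi, dif_pos hi]
        by_cases hc : pvCont wb[i]
        · rw [if_pos hc, if_pos hc]; exact ih fb' (i + 1) (by omega) (by omega) (by omega)
        · rw [if_neg hc, if_neg hc]
          rw [pvPos_eq wb maxn bs vs i (by omega) (by omega)]
          rw [ih fb' (i + 1) (by omega) (by omega) (by omega)]
      · cases fb with
        | zero => rw [pvLoopA, dif_neg hi]; rfl
        | succ fb => rw [pvLoopA, pvLoopB, dif_neg hi, dif_neg hi]

-- at i = 0 the boundary guard kills every emission of A
theorem pvFold_zero (wb : List Nat) (maxn bs vs : Int) :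
    (PySem.List.pyRange 1 (maxn + 1) 1).foldl (fun acc n =>
        let r := pvBuild wb wb.length 0 0 n []
        if 1 ≤ n ∧ n ≤ 6 ∧ ¬((0 : Nat) = 0 ∨ r.2 = wb.length) then
          acc ++ [vs + PySem.Int.mod (pvFnv r.1) bs]
        else acc) [] = [] := by
  generalize PySem.List.pyRange 1 (maxn + 1) 1 = l
  induction l with
  | nil => rfl
  | cons x xs ihx => rw [List.foldl_cons, if_neg (by simp)]; exact ihx

-- the whole of A from i = 0 equals the whole of B from i = 1 (position 0 emits nothing)
theorem pvTop_eq (wb : List Nat) (maxn bs vs : Int) :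
    ∀ f : Nat, wb.length ≤ f →
    pvLoopA wb maxn bs vs f 0 = pvLoopB wb (if 6 < maxn then 6 else maxn) bs vs f 1 := by
  intro f
  cases f with
  | zero => intro _; rfl
  | succ f =>
      intro hf
      rw [pvLoopA]
      by_cases h0 : 0 < wb.length
      · rw [dif_pos h0]
        by_cases hc0 : pvCont (wb[0]'h0)
        · rw [if_pos hc0]
          exact pvLoops_eq wb maxn bs vs f (f + 1) 1 (by omega) (by omega) (le_refl 1)
        · rw [if_neg hc0]
          rw [pvFold_zero wb maxn bs vs, List.nil_append]
          exact pvLoops_eq wb maxn bs vs f (f + 1) 1 (by omega) (by omega) (le_refl 1)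
      · rw [dif_neg h0, pvLoopB, dif_neg (by omega)]

-- ===== VERDICT (by name: the statement is the Claim_ definition above) =====
theorem compute_subwords_spec : Claim_equal_compute_subwords := by
  intro word maxn bs vs _ _
  unfold Spec_compute_subwords compute_subwords compute_subwords_alt
  exact pvTop_eq (pvBytes word) maxn bs vs (pvBytes word).length (le_refl _)
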